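-- pv_equiv track=rewrite | github.com/alzhu1/Handz | deal/functions.py | hands_to_seq
-- ===== SOURCE A (Python) =====
-- def hands_to_seq(HandString):
--     temp_board = list(HandString)
--     Nseq = []
--     Eseq = []
--     Sseq = []
--
--     for i in range(len(temp_board) - 1, -1, -1):
--         if temp_board[i] == "N":
--             Nseq.append(i)
--             del temp_board[i]
--
--     for i in range(len(temp_board) - 1, -1, -1):
--         if temp_board[i] == "E":
--             Eseq.append(i)
--             del temp_board[i]
--
--     for i in range(len(temp_board) - 1, -1, -1):
--         if temp_board[i] == "S":
--             Sseq.append(i)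
--             del temp_board[i]
--
--     Nseq = Nseq[::-1]
--     Eseq = Eseq[::-1]
--     Sseq = Sseq[::-1]
--
--     return (Nseq, Eseq, Sseq)
-- ===== SOURCE B (Python) =====
-- def hands_to_seq(HandString):
--     # One forward pass: an 'E' at original position i lands at index i - (#N before i)
--     # after all N's were removed; an 'S' lands at i - (#N before i) - (#E before i).
--     Nseq = []
--     Eseq = []
--     Sseq = []
--     n = 0
--     e = 0
--     for i, ch in enumerate(HandString):
--         if ch == "N":
--             Nseq.append(i)
--             n += 1
--         elif ch == "E":
--             Eseq.append(i - n)
--             e += 1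
--         elif ch == "S":
--             Sseq.append(i - n - e)
--     return (Nseq, Eseq, Sseq)
-- ===== Notes on version B (the rewrite author's own statement) =====
-- stated objective: faster
-- what changed: Replaced three backward delete-while-scanning passes (each del is O(n)) by a single forward pass that keeps counters of preceding removed N/E characters and computes each adjusted index arithmetically.
import Mathlib
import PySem

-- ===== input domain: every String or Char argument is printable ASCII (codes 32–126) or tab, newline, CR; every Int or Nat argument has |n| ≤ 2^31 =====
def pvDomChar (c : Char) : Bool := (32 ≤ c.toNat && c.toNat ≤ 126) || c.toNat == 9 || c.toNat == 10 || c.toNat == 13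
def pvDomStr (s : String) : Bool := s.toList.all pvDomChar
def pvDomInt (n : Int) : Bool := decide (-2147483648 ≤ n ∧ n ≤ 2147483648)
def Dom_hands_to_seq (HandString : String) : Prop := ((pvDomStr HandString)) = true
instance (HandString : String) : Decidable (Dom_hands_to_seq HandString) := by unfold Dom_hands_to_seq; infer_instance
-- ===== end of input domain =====

-- B replaces A's three backward delete-while-scanning passes (each `del` shifts the tail)
-- by one forward pass adjusting indices with counters of removed characters: O(n) vs O(n^2).

-- ===== PORT A =====
-- A's three loops are textually identical except for the letter; pvPassA is that loop:
-- `for i in range(len(board)-1, -1, -1): if board[i] == c: seq.append(i); del board[i]`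
def pvPassA (c : Char) (st : List Char × List Int) : List Char × List Int :=
  (PySem.List.pyRange ((PySem.List.len st.1 : Int) - 1) (-1) (-1)).foldl
    (fun s i =>
      match PySem.List.pop? s.1 i with   -- board[i] (read) and del board[i] (the removal), exact
      | some (v, rest) => if v = c then (rest, s.2 ++ [i]) else s
      | none => s)                        -- unreachable: i is always in range
    st

def hands_to_seq (HandString : String) : List Int × List Int × List Int :=
  let temp_board := HandString.toList
  let p1 := pvPassA 'N' (temp_board, [])
  let p2 := pvPassA 'E' (p1.1, [])
  let p3 := pvPassA 'S' (p2.1, [])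
  (((PySem.List.slice? p1.2 none none (-1)).getD []),
   ((PySem.List.slice? p2.2 none none (-1)).getD []),
   ((PySem.List.slice? p3.2 none none (-1)).getD []))

-- ===== PORT B =====
-- the body of B's single `for i, ch in enumerate(HandString)` loop
def pvStepB (st : List Int × List Int × List Int × Int × Int) (p : Int × Char) :
    List Int × List Int × List Int × Int × Int :=
  if p.2 = 'N' then (st.1 ++ [p.1], st.2.1, st.2.2.1, st.2.2.2.1 + 1, st.2.2.2.2)
  else if p.2 = 'E' then (st.1, st.2.1 ++ [p.1 - st.2.2.2.1], st.2.2.1, st.2.2.2.1, st.2.2.2.2 + 1)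
  else if p.2 = 'S' then (st.1, st.2.1, st.2.2.1 ++ [p.1 - st.2.2.2.1 - st.2.2.2.2], st.2.2.2.1, st.2.2.2.2)
  else st

def hands_to_seq_alt (HandString : String) : List Int × List Int × List Int :=
  let st := (PySem.List.enumerate HandString.toList 0).foldl pvStepB ([], [], [], 0, 0)
  (st.1, st.2.1, st.2.2.1)

-- ===== PRECONDITION & SPEC =====
def Spec_hands_to_seq (HandString : String) (out : List Int × List Int × List Int) : Prop := out = hands_to_seq_alt HandString
instance (HandString : String) (out : List Int × List Int × List Int) : Decidable (Spec_hands_to_seq HandString out) := by unfold Spec_hands_to_seq; infer_instance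

-- ===== CLAIM (what is proved, stated in full; the proofs are below) =====
def Claim_equal_hands_to_seq : Prop := ∀ (HandString : String), Dom_hands_to_seq HandString → Spec_hands_to_seq HandString (hands_to_seq HandString)

-- ===== LEMMAS AND PROOFS =====

-- positions (from start index i) of character c in a list
def pvIdxs (c : Char) : List Char → Int → List Int
  | [], _ => []
  | x :: xs, i => if x = c then i :: pvIdxs c xs (i + 1) else pvIdxs c xs (i + 1)

lemma pvIdxs_append (c : Char) (xs ys : List Char) (i : Int) :
    pvIdxs c (xs ++ ys) i = pvIdxs c xs i ++ pvIdxs c ys (i + xs.length) := by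
  induction xs generalizing i with
  | nil => simp [pvIdxs]
  | cons x xs ih =>
    simp only [List.cons_append, pvIdxs, ih, List.length_cons]
    split_ifs <;> simp <;> ring_nf

lemma pvPassA_gen (c : Char) (k : Nat) :
    ∀ (l : List Char) (acc : List Int), k ≤ l.length →
    (PySem.List.pyRange ((k : Int) - 1) (-1) (-1)).foldl
      (fun s i =>
        match PySem.List.pop? s.1 i with
        | some (v, rest) => if v = c then (rest, s.2 ++ [i]) else s
        | none => s)
      (l, acc)
    = ((l.take k).filter (· ≠ c) ++ l.drop k, acc ++ (pvIdxs c (l.take k) 0).reverse) :=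
  by
  induction k with
  | zero =>
    intro l acc _
    rw [PySem.List.pyRange_neg_one_eq_nil (by omega)]
    simp [pvIdxs]
  | succ k ih =>
    intro l acc hk
    have hklt : k < l.length := by omega
    rw [show ((k + 1 : Nat) : Int) - 1 = (k : Int) by push_cast; ring,
        PySem.List.pyRange_neg_one_cons (by omega), List.foldl_cons]
    have hpop : PySem.List.pop? l (k : Int) = some (l[k], l.eraseIdx k) :=
      PySem.List.pop?_natCast l k (by simpa using hklt)
    have htake : l.take (k + 1) = l.take k ++ [l[k]] := by
      rw [List.take_add_one]; simp [List.getElem?_eq_getElem hklt]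
    have hidx : pvIdxs c (l.take (k + 1)) 0
        = pvIdxs c (l.take k) 0 ++ pvIdxs c [l[k]] (k : Int) := by
      rw [htake, pvIdxs_append]
      congr 2
      simp [List.length_take, Nat.min_eq_left (le_of_lt hklt)]
    simp only [hpop]
    by_cases hc : l[k] = c
    · simp only [hc, if_true]
      have herase : l.eraseIdx k = l.take k ++ l.drop (k + 1) := List.eraseIdx_eq_take_drop_succ l k
      have hlen : (l.take k).length = k := by simp [Nat.min_eq_left (le_of_lt hklt)]
      rw [ih (l.eraseIdx k) (acc ++ [(k : Int)])
            (by rw [List.length_eraseIdx_of_lt hklt]; omega)]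
      have h1 : (l.eraseIdx k).take k = l.take k := by
        rw [herase, List.take_append_of_le_length (by omega)]
        simp
      have h2 : (l.eraseIdx k).drop k = l.drop (k + 1) := by
        rw [herase, List.drop_append_of_le_length (by omega)]
        simp
      rw [h1, h2, hidx, htake]
      simp [List.filter_append, hc, pvIdxs]
    · simp only [if_neg hc]
      rw [ih l acc (by omega)]
      have hdrop : l.drop k = l[k] :: l.drop (k + 1) := List.drop_eq_getElem_cons hklt
      rw [hidx, htake, hdrop, List.filter_append]
      simp [hc, pvIdxs]

lemma pvPassA_spec (c : Char) (l : List Char) :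
    pvPassA c (l, []) = (l.filter (· ≠ c), (pvIdxs c l 0).reverse) := by
  have h := pvPassA_gen c l.length l [] (le_refl _)
  simpa [pvPassA, PySem.List.len] using h

lemma pvStepB_gen (l : List Char) :
    ∀ (i n e : Int) (N E S : List Int),
    ((PySem.List.enumerate l i).foldl pvStepB (N, E, S, n, e)).1 = N ++ pvIdxs 'N' l i ∧
    ((PySem.List.enumerate l i).foldl pvStepB (N, E, S, n, e)).2.1
      = E ++ pvIdxs 'E' (l.filter (· ≠ 'N')) (i - n) ∧
    ((PySem.List.enumerate l i).foldl pvStepB (N, E, S, n, e)).2.2.1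
      = S ++ pvIdxs 'S' ((l.filter (· ≠ 'N')).filter (· ≠ 'E')) (i - n - e) := by
  induction l with
  | nil => intro i n e N E S; simp [PySem.List.enumerate_nil, pvIdxs]
  | cons x xs ih =>
    intro i n e N E S
    rw [PySem.List.enumerate_cons, List.foldl_cons]
    by_cases hN : x = 'N'
    · have hstep : pvStepB (N, E, S, n, e) (i, x) = (N ++ [i], E, S, n + 1, e) := by
        simp [pvStepB, hN]
      rw [hstep]
      obtain ⟨h1, h2, h3⟩ := ih (i + 1) (n + 1) e (N ++ [i]) E S
      refine ⟨?_, ?_, ?_⟩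
      · rw [h1]; simp [pvIdxs, hN]
      · rw [h2, show (i + 1 - (n + 1) : Int) = i - n by ring]
        simp [hN]
      · rw [h3, show (i + 1 - (n + 1) - e : Int) = i - n - e by ring]
        simp [hN]
    · by_cases hE : x = 'E'
      · have hstep : pvStepB (N, E, S, n, e) (i, x) = (N, E ++ [i - n], S, n, e + 1) := by
          simp [pvStepB, hE]
        rw [hstep]
        obtain ⟨h1, h2, h3⟩ := ih (i + 1) n (e + 1) N (E ++ [i - n]) S
        refine ⟨?_, ?_, ?_⟩
        · rw [h1]; simp [pvIdxs, hE]
        · rw [h2, show (i + 1 - n : Int) = (i - n) + 1 by ring]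
          simp [hE, pvIdxs]
        · rw [h3, show (i + 1 - n - (e + 1) : Int) = i - n - e by ring]
          simp [hE]
      · by_cases hS : x = 'S'
        · have hstep : pvStepB (N, E, S, n, e) (i, x) = (N, E, S ++ [i - n - e], n, e) := by
            simp [pvStepB, hS]
          rw [hstep]
          obtain ⟨h1, h2, h3⟩ := ih (i + 1) n e N E (S ++ [i - n - e])
          refine ⟨?_, ?_, ?_⟩
          · rw [h1]; simp [pvIdxs, hS]
          · rw [h2, show (i + 1 - n : Int) = (i - n) + 1 by ring]
            simp [hS, pvIdxs]
          · rw [h3, show (i + 1 - n - e : Int) = (i - n - e) + 1 by ring]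
            simp [hS, pvIdxs]
        · have hstep : pvStepB (N, E, S, n, e) (i, x) = (N, E, S, n, e) := by
            simp [pvStepB, hN, hE, hS]
          rw [hstep]
          obtain ⟨h1, h2, h3⟩ := ih (i + 1) n e N E S
          refine ⟨?_, ?_, ?_⟩
          · rw [h1]; simp [pvIdxs, hN]
          · rw [h2, show (i + 1 - n : Int) = (i - n) + 1 by ring]
            simp [hN, hE, pvIdxs]
          · rw [h3, show (i + 1 - n - e : Int) = (i - n - e) + 1 by ring]
            simp [hN, hE, hS, pvIdxs]

-- ===== VERDICT (by name: the statement is the Claim_ definition above) =====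
theorem hands_to_seq_spec : Claim_equal_hands_to_seq := by
  intro s _
  unfold Spec_hands_to_seq
  show hands_to_seq s = hands_to_seq_alt s
  obtain ⟨h1, h2, h3⟩ := pvStepB_gen s.toList 0 0 0 [] [] []
  rw [show ((0 : Int) - 0) = 0 by ring] at h2
  rw [show ((0 : Int) - 0 - 0) = 0 by ring] at h3
  simp only [hands_to_seq, hands_to_seq_alt, pvPassA_spec,
    PySem.List.slice?_none_none_neg_one, Option.getD_some, List.reverse_reverse]
  rw [h1, h2, h3]
  simp
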